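-- pv_equiv track=rewrite | github.com/Dichao-Liu/ddr-lfga | eval_dmd.py | _build_per_frame_sets
-- ===== SOURCE A (Python) =====
-- from typing import Dict, List, Set, Tuple, Optional
--
-- def _leaf(name: str) -> str:
--     return name.split("/")[-1] if name else ""
--
-- def _build_per_frame_sets(intervals_by_type: Dict[str, List[Tuple[int, int]]],
--                           num_frames: int,
--                           prefix: str) -> List[Set[str]]:
--     per_frame: List[Set[str]] = [set() for _ in range(num_frames)]
--     for t, ivals in intervals_by_type.items():
--         if not t.startswith(prefix):
--             continue
--         v = _leaf(t)
--         for s, e in ivals: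
--             if num_frames <= 0:
--                 continue
--             s = max(0, min(s, num_frames - 1))
--             e = max(0, min(e, num_frames - 1))
--             if e < s:
--                 s, e = e, s
--             for i in range(s, e + 1):
--                 per_frame[i].add(v)
--     return per_frame
-- ===== SOURCE B (Python) =====
-- def _leaf(name): return name.split("/")[-1] if name else ""
--
-- def _build_per_frame_sets(intervals_by_type, num_frames, prefix):
--     n = num_frames
--     if n <= 0:
--         return []
--     items = []
--     cuts = {0, n}
--     for t, ivals in intervals_by_type.items():
--         if not t.startswith(prefix):
--             continue
--         civ = []
--         for s, e in ivals:
--             lo = max(0, min(s, n - 1))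
--             hi = max(0, min(e, n - 1))
--             if hi < lo:
--                 lo, hi = hi, lo
--             civ.append((lo, hi))
--             cuts.add(lo)
--             cuts.add(hi + 1)
--         items.append((_leaf(t), civ))
--     pts = sorted(cuts)
--     per_frame = []
--     for a, b in zip(pts, pts[1:]):
--         seg = {v for v, civ in items if any(lo <= a <= hi for lo, hi in civ)}
--         per_frame.extend(set(seg) for _ in range(b - a))
--     return per_frame
-- ===== Notes on version B (the rewrite author's own statement) =====
-- stated objective: alternative
-- what changed: A writes the label into every frame of every interval (label-major, work proportional to the sum of interval lengths); B collects the clamped interval endpoints as cut points, sorts them, and emits the output run-length-wise: one covering-set computation per segment between consecutive cut points, replicated across the segment.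
import Mathlib
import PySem

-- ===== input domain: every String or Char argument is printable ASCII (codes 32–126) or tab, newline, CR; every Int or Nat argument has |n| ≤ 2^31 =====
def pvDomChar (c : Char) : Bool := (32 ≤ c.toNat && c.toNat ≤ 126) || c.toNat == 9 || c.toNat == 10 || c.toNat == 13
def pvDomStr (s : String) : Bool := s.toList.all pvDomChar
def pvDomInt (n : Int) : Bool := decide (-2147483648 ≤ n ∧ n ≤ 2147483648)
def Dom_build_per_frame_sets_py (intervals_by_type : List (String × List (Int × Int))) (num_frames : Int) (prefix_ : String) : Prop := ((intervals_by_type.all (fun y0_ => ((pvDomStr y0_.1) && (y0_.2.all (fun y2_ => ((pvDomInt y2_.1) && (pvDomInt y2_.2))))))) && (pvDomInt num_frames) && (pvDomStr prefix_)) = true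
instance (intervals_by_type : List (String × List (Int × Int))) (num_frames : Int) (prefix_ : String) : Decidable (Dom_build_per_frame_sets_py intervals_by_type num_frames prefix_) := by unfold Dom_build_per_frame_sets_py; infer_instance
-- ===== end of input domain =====

-- B is frame-major: each frame's set is computed directly as "the leaves of the matching labels
-- whose clamped intervals cover this frame", instead of A's label-major mutation of the frame
-- sets interval by interval (objective: alternative decomposition, same return value).

-- ===== PORT A =====
-- _leaf: name.split("/")[-1] if name else "" (split "/" never fails and never returns [], so
-- split?.getD [] and the total [-1] form pyGetD … (-1) "" are exact)
def leafPy (name : String) : String :=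
  if name ≠ "" then PySem.List.pyGetD ((PySem.Str.split? name "/").getD []) (-1) "" else ""

def build_per_frame_sets_py (intervals_by_type : List (String × List (Int × Int))) (num_frames : Int) (prefix_ : String) : List (List String) :=
  let per_frame : List (List String) := (PySem.List.pyRange 0 num_frames 1).map (fun _ => PySem.Set.empty)
  intervals_by_type.foldl (fun pf tv =>
    if ¬ PySem.Str.startswith tv.1 prefix_ then pf
    else
      let v := leafPy tv.1
      tv.2.foldl (fun pf2 se =>
        if num_frames ≤ 0 then pf2
        else
          let s := max 0 (min se.1 (num_frames - 1))
          let e := max 0 (min se.2 (num_frames - 1))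
          let p := if e < s then (e, s) else (s, e)
          -- per_frame[i].add(v): every i ∈ [p.1, p.2] is in range, so the total get/set forms are exact
          (PySem.List.pyRange p.1 (p.2 + 1) 1).foldl
            (fun pf3 i => PySem.List.pySetD pf3 i (PySem.Set.add (PySem.List.pyGetD pf3 i PySem.Set.empty) v)) pf2) pf) per_frame

-- ===== PORT B =====
def build_per_frame_sets_py_alt (intervals_by_type : List (String × List (Int × Int))) (num_frames : Int) (prefix_ : String) : List (List String) :=
  if num_frames ≤ 0 then []
  else
    -- one pass over the dict collecting (leaf, clamped intervals) per matching label and the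
    -- set of cut points {0, n} ∪ {lo, hi+1}
    let ic := intervals_by_type.foldl (fun (ic : List (String × List (Int × Int)) × List Int) tv =>
      if ¬ PySem.Str.startswith tv.1 prefix_ then ic
      else
        let cc := tv.2.foldl (fun (cc : List (Int × Int) × List Int) se =>
            let lo := max 0 (min se.1 (num_frames - 1))
            let hi := max 0 (min se.2 (num_frames - 1))
            let p := if hi < lo then (hi, lo) else (lo, hi)
            (cc.1 ++ [p], PySem.Set.add (PySem.Set.add cc.2 p.1) (p.2 + 1)))
          (([] : List (Int × Int)), ic.2)
        (ic.1 ++ [(leafPy tv.1, cc.1)], cc.2))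
      (([] : List (String × List (Int × Int))), PySem.Set.add (PySem.Set.add PySem.Set.empty 0) num_frames)
    let pts := PySem.List.sorted ic.2 (fun x => x) false
    -- zip(pts, pts[1:]): pts[1:] is pts.tail here (exact: slicing a list from 1)
    (pts.zip pts.tail).foldl (fun pf ab =>
        pf ++ List.replicate (ab.2 - ab.1).toNat
          -- the per-segment set comprehension, in dict iteration order
          (ic.1.foldl (fun seg it =>
              if it.2.any (fun lh => decide (lh.1 ≤ ab.1) && decide (ab.1 ≤ lh.2))
              then PySem.Set.add seg it.1 else seg)
            PySem.Set.empty)) []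

-- ===== PRECONDITION & SPEC =====
def Spec_build_per_frame_sets_py (intervals_by_type : List (String × List (Int × Int))) (num_frames : Int) (prefix_ : String) (out : List (List String)) : Prop := out = build_per_frame_sets_py_alt intervals_by_type num_frames prefix_
instance (intervals_by_type : List (String × List (Int × Int))) (num_frames : Int) (prefix_ : String) (out : List (List String)) : Decidable (Spec_build_per_frame_sets_py intervals_by_type num_frames prefix_ out) := by unfold Spec_build_per_frame_sets_py; infer_instance

-- ===== CLAIM (what is proved, stated in full; the proofs are below) =====
def Claim_equal_build_per_frame_sets_py : Prop := ∀ (intervals_by_type : List (String × List (Int × Int))) (num_frames : Int) (prefix_ : String), Dom_build_per_frame_sets_py intervals_by_type num_frames prefix_ → Spec_build_per_frame_sets_py intervals_by_type num_frames prefix_ (build_per_frame_sets_py intervals_by_type num_frames prefix_)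

-- ===== LEMMAS AND PROOFS =====

-- the clamped-and-swapped interval of one (s, e) pair (written let-free so it unfolds to the ports' terms)
def pvClamp (nf : Int) (se : Int × Int) : Int × Int :=
  if max 0 (min se.2 (nf - 1)) < max 0 (min se.1 (nf - 1)) then
    (max 0 (min se.2 (nf - 1)), max 0 (min se.1 (nf - 1)))
  else (max 0 (min se.1 (nf - 1)), max 0 (min se.2 (nf - 1)))

-- does some clamped interval of ivals cover frame i?
def pvCov (nf : Int) (ivals : List (Int × Int)) (i : Int) : Bool :=
  ivals.any (fun se => decide ((pvClamp nf se).1 ≤ i) && decide (i ≤ (pvClamp nf se).2))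

-- the shared frame update per_frame[i].add(v)
def pvUpd (v : String) (pf3 : List (List String)) (i : Int) : List (List String) :=
  PySem.List.pySetD pf3 i (PySem.Set.add (PySem.List.pyGetD pf3 i PySem.Set.empty) v)

-- A's per-interval step
def pvAStep (nf : Int) (v : String) (pf2 : List (List String)) (se : Int × Int) : List (List String) :=
  if nf ≤ 0 then pf2
  else (PySem.List.pyRange (pvClamp nf se).1 ((pvClamp nf se).2 + 1) 1).foldl (pvUpd v) pf2

-- A's per-type step (the body of A's outer fold, with the inner loops named)
def pvAType (nf : Int) (prefix_ : String) (pf : List (List String)) (tv : String × List (Int × Int)) : List (List String) :=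
  if ¬ PySem.Str.startswith tv.1 prefix_ then pf
  else tv.2.foldl (pvAStep nf (leafPy tv.1)) pf

-- B's per-frame accumulator step
def pvBStep (nf : Int) (prefix_ : String) (i : Int) (acc : List String) (tv : String × List (Int × Int)) : List String :=
  if PySem.Str.startswith tv.1 prefix_ && pvCov nf tv.2 i
  then PySem.Set.add acc (leafPy tv.1) else acc

-- add v to every frame set whose index satisfies c (the normal form of A's per-type pass)
def pvAdd (v : String) (c : Int → Bool) (pf : List (List String)) : List (List String) :=
  pf.mapIdx (fun j st => if c (j : Int) then PySem.Set.add st v else st)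

theorem length_pvAdd (v : String) (c : Int → Bool) (pf : List (List String)) :
    (pvAdd v c pf).length = pf.length := by simp [pvAdd]

theorem getElem_pvAdd (v : String) (c : Int → Bool) (pf : List (List String)) (j : Nat)
    (h : j < (pvAdd v c pf).length) :
    (pvAdd v c pf)[j] = if c (j : Int) then PySem.Set.add (pf[j]'(by simpa [pvAdd] using h)) v
                        else pf[j]'(by simpa [pvAdd] using h) := by
  simp only [pvAdd, List.getElem_mapIdx]

theorem pvAdd_false {v : String} {c : Int → Bool} (pf : List (List String))
    (h : ∀ j : Nat, j < pf.length → c (j : Int) = false) :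
    pvAdd v c pf = pf := by
  apply List.ext_getElem (by simp [pvAdd])
  intro j h1 h2
  rw [getElem_pvAdd, h j h2]
  simp

theorem pvAdd_shift (v : String) (P : Int → Bool) (a : Int) (pf : List (List String)) (h0 : 0 ≤ a) :
    pvAdd v (fun i => a + 1 ≤ i && P i) (if P a then pvUpd v pf a else pf)
    = pvAdd v (fun i => a ≤ i && P i) pf := by
  have hlen : (if P a then pvUpd v pf a else pf).length = pf.length := by
    by_cases hP : P a <;> simp [hP, pvUpd, PySem.List.pySetD_of_nonneg pf _ h0]
  apply List.ext_getElem (by simp [pvAdd, hlen])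
  intro j h1 h2
  rw [getElem_pvAdd, getElem_pvAdd]
  by_cases hja : (j : Int) = a
  · have hjn : j = a.toNat := by omega
    have hja' : j < pf.length := by simpa [pvAdd] using h2
    have h1' : ¬ (a + 1 ≤ (j : Int)) := by omega
    have h2' : a ≤ (j : Int) := by omega
    by_cases hP : P a
    · have hPj : P (j : Int) = true := by rw [hja]; exact hP
      have e1 : (if P a then pvUpd v pf a else pf)
          = pf.set a.toNat (PySem.Set.add (pf[a.toNat]'(by omega)) v) := by
        rw [if_pos hP]; unfold pvUpd
        rw [PySem.List.pySetD_of_nonneg pf _ h0, PySem.List.pyGetD_eq_getElem pf _ h0 (by omega)]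
      have c1 : (decide (a + 1 ≤ (j:Int)) && P j) = false := by simp [h1']
      have c2 : (decide (a ≤ (j:Int)) && P j) = true := by simp [h2', hPj]
      simp [e1, hjn, List.getElem_set_self]
      intro hcontra
      rw [show max a 0 = a from by omega] at hcontra
      simp [hP] at hcontra
    · have e1 : (if P a then pvUpd v pf a else pf) = pf := by simp [hP]
      have hPj : P (j : Int) = false := by rw [hja]; simpa using hP
      simp [hPj, e1]
  · have hcond : (decide (a + 1 ≤ (j:Int)) && P j) = (decide (a ≤ (j:Int)) && P j) := by
      by_cases hle : a + 1 ≤ (j : Int)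
      · simp [hle, show a ≤ (j:Int) by omega]
      · simp [hle, show ¬ (a ≤ (j:Int)) by omega]
    have hent : (if P a then pvUpd v pf a else pf)[j]'(by rw [hlen]; simpa [pvAdd] using h2)
        = pf[j]'(by simpa [pvAdd] using h2) := by
      by_cases hP : P a
      · simp only [hP, if_pos, pvUpd, PySem.List.pySetD_of_nonneg pf _ h0]
        exact List.getElem_set_ne (by omega) _
      · simp [hP]
    simp only [hcond, hent]

-- A's inner range loop is pvAdd over the clamped interval
theorem A_range (v : String) : ∀ (n : Nat) (lo hi : Int) (pf : List (List String)),
    0 ≤ lo → (hi + 1 - lo).toNat = n →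
    (PySem.List.pyRange lo (hi + 1) 1).foldl (pvUpd v) pf
    = pvAdd v (fun i => lo ≤ i && i ≤ hi) pf := by
  intro n
  induction n with
  | zero =>
    intro lo hi pf h0 hn
    rw [PySem.List.pyRange_one_eq_nil (by omega), List.foldl_nil, pvAdd_false]
    intro j hj
    have h1 : ¬ (lo ≤ (j : Int) ∧ (j : Int) ≤ hi) := by omega
    by_cases h : lo ≤ (j : Int) <;> simp [h] <;> omega
  | succ k ih =>
    intro lo hi pf h0 hn
    rw [PySem.List.pyRange_one_cons (by omega), List.foldl_cons]
    rw [ih (lo + 1) hi _ (by omega) (by omega)]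
    have := pvAdd_shift v (fun i => decide (i ≤ hi)) lo pf h0
    rw [if_pos (by simp; omega)] at this
    simpa using this

-- A's per-type pass is pvAdd over coverage (with coverage phrased through B's _covers)
theorem A_type (v : String) (nf : Int) (h : 0 < nf) : ∀ (ivals : List (Int × Int)) (pf : List (List String)),
    ivals.foldl (pvAStep nf v) pf = pvAdd v (pvCov nf ivals) pf := by
  intro ivals
  induction ivals with
  | nil =>
    intro pf
    rw [List.foldl_nil, pvAdd_false]
    intro j hj; simp [pvCov]
  | cons se rest ih =>
    intro pf
    rw [List.foldl_cons]
    have hstep : pvAStep nf v pf se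
        = pvAdd v (fun i => (pvClamp nf se).1 ≤ i && i ≤ (pvClamp nf se).2) pf := by
      unfold pvAStep
      rw [if_neg (by omega)]
      exact A_range v _ _ _ pf (by unfold pvClamp; split <;> simp <;> omega) rfl
    rw [hstep, ih]
    -- pvAdd composes: adding the same v twice is adding once on the union of conditions
    apply List.ext_getElem (by simp [pvAdd])
    intro j h1 h2
    rw [getElem_pvAdd, getElem_pvAdd, getElem_pvAdd]
    have hidem : ∀ s : List String, PySem.Set.add (PySem.Set.add s v) v = PySem.Set.add s v := by
      intro s
      unfold PySem.Set.add PySem.Set.contains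
      by_cases hc : s.contains v <;> (simp [hc]; by_cases hm : v ∈ s <;> simp_all)
    have hcov : pvCov nf (se :: rest) (j : Int)
        = (pvCov nf rest (j : Int)
           || ((pvClamp nf se).1 ≤ (j:Int) && (j:Int) ≤ (pvClamp nf se).2)) := by
      simp [pvCov, Bool.or_comm]
    by_cases hr : pvCov nf rest (j : Int) <;>
      by_cases hse : ((pvClamp nf se).1 ≤ (j:Int) && (j:Int) ≤ (pvClamp nf se).2) <;>
      simp [hr, hse, hcov]

-- label-major = frame-major: A's outer fold preserves the frame count …
theorem A_fold_len (nf : Int) (prefix_ : String) (h : 0 < nf) :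
    ∀ (ibt : List (String × List (Int × Int))) (pf : List (List String)),
    (ibt.foldl (pvAType nf prefix_) pf).length = pf.length := by
  intro ibt
  induction ibt with
  | nil => intro pf; rfl
  | cons tv rest ih =>
    intro pf
    rw [List.foldl_cons, ih]
    unfold pvAType
    by_cases hs : PySem.Str.startswith tv.1 prefix_
    · rw [if_neg (not_not_intro hs), A_type (leafPy tv.1) nf h tv.2 pf, length_pvAdd]
    · rw [if_pos hs]

-- … and, read off at frame j, is B's per-frame fold
theorem A_fold_frames (nf : Int) (prefix_ : String) (h : 0 < nf) :
    ∀ (ibt : List (String × List (Int × Int))) (pf : List (List String))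
      (j : Nat) (hj : j < pf.length),
      (ibt.foldl (pvAType nf prefix_) pf)[j]?
      = some (ibt.foldl (pvBStep nf prefix_ (j : Int)) (pf[j]'hj)) := by
  intro ibt
  induction ibt with
  | nil => intro pf j hj; exact List.getElem?_eq_getElem hj
  | cons tv rest ih =>
    intro pf j hj
    rw [List.foldl_cons, List.foldl_cons]
    by_cases hs : PySem.Str.startswith tv.1 prefix_
    · have hA : pvAType nf prefix_ pf tv = pvAdd (leafPy tv.1) (pvCov nf tv.2) pf := by
        unfold pvAType
        rw [if_neg (not_not_intro hs)]
        exact A_type (leafPy tv.1) nf h tv.2 pf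
      have hj' : j < (pvAType nf prefix_ pf tv).length := by rw [hA, length_pvAdd]; exact hj
      rw [ih (pvAType nf prefix_ pf tv) j hj']
      have hget : (pvAType nf prefix_ pf tv)[j]'hj'
          = pvBStep nf prefix_ (j : Int) (pf[j]'hj) tv := by
        have e : (pvAType nf prefix_ pf tv)[j]? = (pvAdd (leafPy tv.1) (pvCov nf tv.2) pf)[j]? := by
          rw [hA]
        rw [List.getElem?_eq_getElem hj',
            List.getElem?_eq_getElem (show j < (pvAdd (leafPy tv.1) (pvCov nf tv.2) pf).length by rw [length_pvAdd]; exact hj),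
            Option.some.injEq] at e
        rw [e, getElem_pvAdd]
        unfold pvBStep
        have hs' : PySem.Chars.startswith tv.1.toList prefix_.toList = true := hs
        by_cases hc : pvCov nf tv.2 (j : Int) <;> simp [hc, hs']
      rw [hget]
    · have hA : pvAType nf prefix_ pf tv = pf := by unfold pvAType; rw [if_pos hs]
      have hstep : pvBStep nf prefix_ (j : Int) (pf[j]'hj) tv = pf[j]'hj := by
        unfold pvBStep
        rw [eq_false_of_ne_true hs, Bool.false_and, if_neg (by simp)]
      rw [hstep, hA, ih pf j hj]

-- with num_frames ≤ 0 A's loops never touch the (empty) frame list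
theorem A_inner_nil (nf : Int) (v : String) (hnf : nf ≤ 0) (ivals : List (Int × Int))
    (pf : List (List String)) : ivals.foldl (pvAStep nf v) pf = pf := by
  induction ivals generalizing pf with
  | nil => rfl
  | cons se rest ih => rw [List.foldl_cons]; rw [show pvAStep nf v pf se = pf by simp [pvAStep, hnf]]; exact ih pf

theorem A_nil (nf : Int) (prefix_ : String) (hnf : nf ≤ 0)
    (ibt : List (String × List (Int × Int))) (pf : List (List String)) :
    ibt.foldl (pvAType nf prefix_) pf = pf := by
  induction ibt generalizing pf with
  | nil => rfl
  | cons tv rest ih =>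
    rw [List.foldl_cons]
    unfold pvAType
    by_cases hs : PySem.Str.startswith tv.1 prefix_
    · rw [if_neg (not_not_intro hs), A_inner_nil nf _ hnf]; exact ih pf
    · rw [if_pos hs]; exact ih pf

-- the common normal form of both programs: frame-major, one fold over the dict per frame
def pvFrames (nf : Int) (prefix_ : String) (ibt : List (String × List (Int × Int))) : List (List String) :=
  (PySem.List.pyRange 0 nf 1).map (fun i => ibt.foldl (pvBStep nf prefix_ i) PySem.Set.empty)

-- A equals the frame-major normal form
theorem A_eq_frames (ibt : List (String × List (Int × Int))) (nf : Int) (pre : String) :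
    build_per_frame_sets_py ibt nf pre = pvFrames nf pre ibt := by
  have hA : build_per_frame_sets_py ibt nf pre
      = ibt.foldl (pvAType nf pre) ((PySem.List.pyRange 0 nf 1).map (fun _ => PySem.Set.empty)) := rfl
  rw [hA]
  by_cases hnf : nf ≤ 0
  · rw [A_nil nf pre hnf]
    unfold pvFrames
    rw [PySem.List.pyRange_one_eq_nil hnf, List.map_nil, List.map_nil]
  · have h : 0 < nf := by omega
    have hlen0 : ((PySem.List.pyRange 0 nf 1).map (fun _ => (PySem.Set.empty : List String))).length = nf.toNat := by
      rw [List.length_map, PySem.List.length_pyRange_one]; omega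
    apply List.ext_getElem
    · unfold pvFrames
      rw [A_fold_len nf pre h, hlen0, List.length_map, PySem.List.length_pyRange_one]
      omega
    · intro j h1 h2
      have hj : j < ((PySem.List.pyRange 0 nf 1).map (fun _ => (PySem.Set.empty : List String))).length := by
        rw [A_fold_len nf pre h] at h1; exact h1
      have hframe := A_fold_frames nf pre h ibt _ j hj
      rw [List.getElem?_eq_getElem h1] at hframe
      have hempty : ((PySem.List.pyRange 0 nf 1).map (fun _ => (PySem.Set.empty : List String)))[j]'hj
          = PySem.Set.empty := by simp
      rw [hempty] at hframe
      rw [Option.some.injEq] at hframe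
      rw [hframe]
      have hjr : j < (PySem.List.pyRange 0 nf 1).length := by
        rw [PySem.List.length_pyRange_one]; rw [hlen0] at hj; omega
      unfold pvFrames
      simp only [List.getElem_map]
      rw [PySem.List.getElem_pyRange_one, zero_add]

-- ===== B side =====

-- B's cut-point accumulation per interval …
def pvCutsF (nf : Int) (c : List Int) (se : Int × Int) : List Int :=
  PySem.Set.add (PySem.Set.add c (pvClamp nf se).1) ((pvClamp nf se).2 + 1)

-- … and B's outer step over the dict, with the inner lets resolved to pvClamp / pvCutsF
def pvOuterStep (nf : Int) (prefix_ : String)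
    (ic : List (String × List (Int × Int)) × List Int) (tv : String × List (Int × Int)) :
    List (String × List (Int × Int)) × List Int :=
  if ¬ PySem.Str.startswith tv.1 prefix_ then ic
  else
    let cc := tv.2.foldl (fun cc se => (cc.1 ++ [pvClamp nf se], pvCutsF nf cc.2 se)) ([], ic.2)
    (ic.1 ++ [(leafPy tv.1, cc.1)], cc.2)

theorem pvClamp_bounds (nf : Int) (h : 0 < nf) (se : Int × Int) :
    0 ≤ (pvClamp nf se).1 ∧ (pvClamp nf se).1 ≤ (pvClamp nf se).2 ∧ (pvClamp nf se).2 ≤ nf - 1 := by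
  unfold pvClamp; split <;> simp <;> omega

-- the inner fold in closed form
theorem inner_fold (nf : Int) : ∀ (ivals : List (Int × Int)) (l0 : List (Int × Int)) (c0 : List Int),
    ivals.foldl (fun cc se => (cc.1 ++ [pvClamp nf se], pvCutsF nf cc.2 se)) (l0, c0)
    = (l0 ++ ivals.map (pvClamp nf), ivals.foldl (pvCutsF nf) c0) := by
  intro ivals
  induction ivals with
  | nil => intro l0 c0; simp
  | cons se rest ih =>
    intro l0 c0
    rw [List.foldl_cons, ih, List.foldl_cons]
    simp

-- the outer fold: the items component in closed form
theorem outer_items (nf : Int) (pre : String) :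
    ∀ (ibt : List (String × List (Int × Int))) (l0 : List (String × List (Int × Int))) (c0 : List Int),
    (ibt.foldl (pvOuterStep nf pre) (l0, c0)).1
    = l0 ++ (ibt.filter (fun tv => PySem.Str.startswith tv.1 pre)).map
        (fun tv => (leafPy tv.1, tv.2.map (pvClamp nf))) := by
  intro ibt
  induction ibt with
  | nil => intro l0 c0; simp
  | cons tv rest ih =>
    intro l0 c0
    rw [List.foldl_cons]
    by_cases hs : PySem.Str.startswith tv.1 pre
    · have hstep : pvOuterStep nf pre (l0, c0) tv
          = (l0 ++ [(leafPy tv.1, tv.2.map (pvClamp nf))], tv.2.foldl (pvCutsF nf) c0) := by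
        unfold pvOuterStep
        rw [if_neg (not_not_intro hs)]
        simp [inner_fold nf tv.2 [] c0]
      rw [hstep, ih]
      simp only [List.filter_cons]
      rw [if_pos hs, List.map_cons]
      simp
    · have hstep : pvOuterStep nf pre (l0, c0) tv = (l0, c0) := by
        unfold pvOuterStep; rw [if_pos hs]
      rw [hstep, ih]
      simp only [List.filter_cons]
      rw [if_neg hs]

-- the outer fold: the cuts component in closed form
theorem outer_cuts (nf : Int) (pre : String) :
    ∀ (ibt : List (String × List (Int × Int))) (l0 : List (String × List (Int × Int))) (c0 : List Int),
    (ibt.foldl (pvOuterStep nf pre) (l0, c0)).2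
    = (ibt.filter (fun tv => PySem.Str.startswith tv.1 pre)).foldl
        (fun c tv => tv.2.foldl (pvCutsF nf) c) c0 := by
  intro ibt
  induction ibt with
  | nil => intro l0 c0; simp
  | cons tv rest ih =>
    intro l0 c0
    rw [List.foldl_cons]
    by_cases hs : PySem.Str.startswith tv.1 pre
    · have hstep : pvOuterStep nf pre (l0, c0) tv
          = (l0 ++ [(leafPy tv.1, tv.2.map (pvClamp nf))], tv.2.foldl (pvCutsF nf) c0) := by
        unfold pvOuterStep
        rw [if_neg (not_not_intro hs)]
        simp [inner_fold nf tv.2 [] c0]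
      rw [hstep, ih]
      simp only [List.filter_cons]
      rw [if_pos hs, List.foldl_cons]
    · have hstep : pvOuterStep nf pre (l0, c0) tv = (l0, c0) := by
        unfold pvOuterStep; rw [if_pos hs]
      rw [hstep, ih]
      simp only [List.filter_cons]
      rw [if_neg hs]

-- membership is monotone through the cuts folds
theorem mem_pvCutsF (nf : Int) (x : Int) (c : List Int) (se : Int × Int) (h : x ∈ c) :
    x ∈ pvCutsF nf c se := by
  unfold pvCutsF
  exact (PySem.Set.mem_add _ _ _).mpr (Or.inl ((PySem.Set.mem_add _ _ _).mpr (Or.inl h)))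

theorem mem_cuts_foldl_inner (nf : Int) : ∀ (ivals : List (Int × Int)) (c0 : List Int) (x : Int),
    x ∈ c0 → x ∈ ivals.foldl (pvCutsF nf) c0 := by
  intro ivals
  induction ivals with
  | nil => intro c0 x h; exact h
  | cons se rest ih => intro c0 x h; exact ih _ x (mem_pvCutsF nf x c0 se h)

theorem mem_cuts_foldl (nf : Int) : ∀ (l : List (String × List (Int × Int))) (c0 : List Int) (x : Int),
    x ∈ c0 → x ∈ l.foldl (fun c tv => tv.2.foldl (pvCutsF nf) c) c0 := by
  intro l
  induction l with
  | nil => intro c0 x h; exact h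
  | cons tv rest ih => intro c0 x h; exact ih _ x (mem_cuts_foldl_inner nf tv.2 c0 x h)

-- every clamped endpoint of every (filtered) interval ends up in the cuts
theorem endpoints_mem_inner (nf : Int) : ∀ (ivals : List (Int × Int)) (c0 : List Int) (se : Int × Int),
    se ∈ ivals → (pvClamp nf se).1 ∈ ivals.foldl (pvCutsF nf) c0
      ∧ (pvClamp nf se).2 + 1 ∈ ivals.foldl (pvCutsF nf) c0 := by
  intro ivals
  induction ivals with
  | nil => intro c0 se h; cases h
  | cons se0 rest ih =>
    intro c0 se h
    rw [List.foldl_cons]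
    rcases List.mem_cons.mp h with h1 | h2
    · subst h1
      constructor
      · exact mem_cuts_foldl_inner nf rest _ _ (by
          unfold pvCutsF
          exact (PySem.Set.mem_add _ _ _).mpr (Or.inl ((PySem.Set.mem_add _ _ _).mpr (Or.inr rfl))))
      · exact mem_cuts_foldl_inner nf rest _ _ (by
          unfold pvCutsF
          exact (PySem.Set.mem_add _ _ _).mpr (Or.inr rfl))
    · exact ih _ se h2

theorem endpoints_mem (nf : Int) : ∀ (l : List (String × List (Int × Int))) (c0 : List Int)
    (tv : String × List (Int × Int)) (se : Int × Int), tv ∈ l → se ∈ tv.2 →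
    (pvClamp nf se).1 ∈ l.foldl (fun c tv => tv.2.foldl (pvCutsF nf) c) c0
      ∧ (pvClamp nf se).2 + 1 ∈ l.foldl (fun c tv => tv.2.foldl (pvCutsF nf) c) c0 := by
  intro l
  induction l with
  | nil => intro c0 tv se h; cases h
  | cons tv0 rest ih =>
    intro c0 tv se h hse
    rw [List.foldl_cons]
    rcases List.mem_cons.mp h with h1 | h2
    · subst h1
      exact ⟨mem_cuts_foldl nf rest _ _ (endpoints_mem_inner nf tv.2 c0 se hse).1,
            mem_cuts_foldl nf rest _ _ (endpoints_mem_inner nf tv.2 c0 se hse).2⟩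
    · exact ih _ tv se h2 hse

-- the cuts stay duplicate-free and inside [0, nf]
theorem cuts_nodup_inner (nf : Int) : ∀ (ivals : List (Int × Int)) (c0 : List Int),
    c0.Nodup → (ivals.foldl (pvCutsF nf) c0).Nodup := by
  intro ivals
  induction ivals with
  | nil => intro c0 h; exact h
  | cons se rest ih =>
    intro c0 h
    exact ih _ (PySem.Set.nodup_add _ _ (PySem.Set.nodup_add _ _ h))

theorem cuts_nodup (nf : Int) : ∀ (l : List (String × List (Int × Int))) (c0 : List Int),
    c0.Nodup → (l.foldl (fun c tv => tv.2.foldl (pvCutsF nf) c) c0).Nodup := by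
  intro l
  induction l with
  | nil => intro c0 h; exact h
  | cons tv rest ih => intro c0 h; exact ih _ (cuts_nodup_inner nf tv.2 c0 h)

theorem mem_add_elim {x v : Int} {c : List Int} (h : x ∈ PySem.Set.add c v) : x ∈ c ∨ x = v :=
  (PySem.Set.mem_add _ _ _).mp h

theorem cuts_bounds_inner (nf : Int) (h0 : 0 < nf) : ∀ (ivals : List (Int × Int)) (c0 : List Int),
    (∀ x ∈ c0, 0 ≤ x ∧ x ≤ nf) → ∀ x ∈ ivals.foldl (pvCutsF nf) c0, 0 ≤ x ∧ x ≤ nf := by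
  intro ivals
  induction ivals with
  | nil => intro c0 h x hx; exact h x hx
  | cons se rest ih =>
    intro c0 h
    apply ih
    intro x hx
    unfold pvCutsF at hx
    rcases mem_add_elim hx with hx1 | hx1
    · rcases mem_add_elim hx1 with hx2 | hx2
      · exact h x hx2
      · have := pvClamp_bounds nf h0 se; omega
    · have := pvClamp_bounds nf h0 se; omega

theorem cuts_bounds (nf : Int) (h0 : 0 < nf) : ∀ (l : List (String × List (Int × Int))) (c0 : List Int),
    (∀ x ∈ c0, 0 ≤ x ∧ x ≤ nf) → ∀ x ∈ l.foldl (fun c tv => tv.2.foldl (pvCutsF nf) c) c0, 0 ≤ x ∧ x ≤ nf := by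
  intro l
  induction l with
  | nil => intro c0 h x hx; exact h x hx
  | cons tv rest ih => intro c0 h; exact ih _ (cuts_bounds_inner nf h0 tv.2 c0 h)

-- the per-segment fold over the collected items is the frame set of the segment's first frame
theorem any_congr_mem {α : Type} (l : List α) (f g : α → Bool)
    (h : ∀ x ∈ l, f x = g x) : l.any f = l.any g := by
  induction l with
  | nil => rfl
  | cons x rest ih =>
    simp only [List.any_cons]
    rw [h x List.mem_cons_self, ih (fun y hy => h y (List.mem_cons_of_mem x hy))]

theorem segset_eq (nf : Int) (pre : String) (a : Int) :
    ∀ (ibt : List (String × List (Int × Int))) (s : List String),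
    ((ibt.filter (fun tv => PySem.Str.startswith tv.1 pre)).map
        (fun tv => (leafPy tv.1, tv.2.map (pvClamp nf)))).foldl
      (fun seg it => if it.2.any (fun lh => decide (lh.1 ≤ a) && decide (a ≤ lh.2))
                     then PySem.Set.add seg it.1 else seg) s
    = ibt.foldl (pvBStep nf pre a) s := by
  intro ibt
  induction ibt with
  | nil => intro s; rfl
  | cons tv rest ih =>
    intro s
    by_cases hs : PySem.Str.startswith tv.1 pre
    · rw [List.filter_cons_of_pos (by simpa using hs), List.map_cons, List.foldl_cons, List.foldl_cons]
      rw [ih]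
      congr 1
      have hany : (tv.2.map (pvClamp nf)).any (fun lh => decide (lh.1 ≤ a) && decide (a ≤ lh.2))
          = pvCov nf tv.2 a := by
        unfold pvCov
        rw [List.any_map]
        rfl
      unfold pvBStep
      rw [hany, hs, Bool.true_and]
    · rw [List.filter_cons_of_neg (by simpa using hs), List.foldl_cons]
      rw [ih]
      congr 1
      unfold pvBStep
      rw [eq_false_of_ne_true hs, Bool.false_and, if_neg (by simp)]

-- constancy: if no cut point lies in (a, i], the frame set at i is the frame set at a
theorem frame_const (nf : Int) (pre : String) (ibt : List (String × List (Int × Int)))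
    (cuts : List Int)
    (hcut : ∀ tv ∈ ibt, PySem.Str.startswith tv.1 pre = true → ∀ se ∈ tv.2,
      (pvClamp nf se).1 ∈ cuts ∧ (pvClamp nf se).2 + 1 ∈ cuts)
    (a i : Int) (hai : a ≤ i) (hno : ∀ c ∈ cuts, ¬ (a < c ∧ c ≤ i)) :
    ibt.foldl (pvBStep nf pre i) PySem.Set.empty = ibt.foldl (pvBStep nf pre a) PySem.Set.empty := by
  apply PySem.List.foldl_congr_mem
  intro acc tv htv
  unfold pvBStep
  by_cases hs : PySem.Str.startswith tv.1 pre
  · have hcov : pvCov nf tv.2 i = pvCov nf tv.2 a := by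
      unfold pvCov
      apply any_congr_mem
      intro se hse
      obtain ⟨h1, h2⟩ := hcut tv htv hs se hse
      have e1 : decide ((pvClamp nf se).1 ≤ i) = decide ((pvClamp nf se).1 ≤ a) := by
        have := hno _ h1
        by_cases hx : (pvClamp nf se).1 ≤ a
        · simp [hx, le_trans hx hai]
        · have : ¬ ((pvClamp nf se).1 ≤ i) := by
            intro hc; exact (hno _ h1) ⟨by omega, hc⟩
          simp [hx, this]
      have e2 : decide (i ≤ (pvClamp nf se).2) = decide (a ≤ (pvClamp nf se).2) := by
        by_cases hx : i ≤ (pvClamp nf se).2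
        · simp [hx, le_trans hai hx]
        · have : ¬ (a ≤ (pvClamp nf se).2) := by
            intro hc; exact (hno _ h2) ⟨by omega, by omega⟩
          simp [hx, this]
      rw [e1, e2]
    rw [hcov]
  · rw [eq_false_of_ne_true hs]
    simp

-- a constant map over a range is a replicate
theorem map_range_const {α : Type} (F : Int → α) (x y : Int)
    (h : ∀ i, x ≤ i → i < y → F i = F x) :
    (PySem.List.pyRange x y 1).map F = List.replicate (y - x).toNat (F x) := by
  have : ∀ i ∈ PySem.List.pyRange x y 1, F i = F x := by
    intro i hi
    have := PySem.List.mem_pyRange_one.mp hi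
    exact h i this.1 this.2
  calc (PySem.List.pyRange x y 1).map F
      = (PySem.List.pyRange x y 1).map (fun _ => F x) := List.map_congr_left this
    _ = List.replicate (PySem.List.pyRange x y 1).length (F x) := by
        rw [List.map_const']
    _ = List.replicate (y - x).toNat (F x) := by rw [PySem.List.length_pyRange_one]

-- the last element of a strictly increasing list bounds it
theorem pairwise_lastD : ∀ (q : List Int) (x : Int), (x :: q).Pairwise (· < ·) →
    (q.getLastD x ∈ x :: q ∧ ∀ y ∈ x :: q, y ≤ q.getLastD x) := by
  intro q
  induction q with
  | nil =>
    intro x _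
    rw [List.getLastD_nil]
    exact ⟨List.mem_cons_self, by intro y hy; simp at hy; omega⟩
  | cons y q' ih =>
    intro x hp
    have hp' : (y :: q').Pairwise (· < ·) := hp.of_cons
    have hxy : x < y := (List.pairwise_cons.mp hp).1 y List.mem_cons_self
    obtain ⟨hm, hb⟩ := ih y hp'
    rw [List.getLastD_cons]
    constructor
    · exact List.mem_cons_of_mem x hm
    · intro z hz
      rcases List.mem_cons.mp hz with h1 | h2
      · subst h1
        have := hb y List.mem_cons_self
        omega
      · exact hb z h2

-- segment fold: consecutive cut points tile [head, last) and F is constant on each tile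
theorem seg_fold {F : Int → List String} {cuts : List Int}
    (hF : ∀ a i, a ≤ i → (∀ c ∈ cuts, ¬ (a < c ∧ c ≤ i)) → F i = F a) :
    ∀ (q : List Int) (x : Int) (acc : List (List String)),
    (x :: q).Pairwise (· < ·) →
    (∀ c ∈ cuts, c ≤ x ∨ c ∈ q) →
    ((x :: q).zip q).foldl (fun pf ab => pf ++ List.replicate (ab.2 - ab.1).toNat (F ab.1)) acc
    = acc ++ (PySem.List.pyRange x (q.getLastD x) 1).map F := by
  intro q
  induction q with
  | nil =>
    intro x acc _ _
    rw [List.getLastD_nil, PySem.List.pyRange_one_eq_nil (le_refl x), List.map_nil, List.append_nil]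
    rfl
  | cons y q' ih =>
    intro x acc hp hinv
    have hp' : (y :: q').Pairwise (· < ·) := hp.of_cons
    have hxy : x < y := (List.pairwise_cons.mp hp).1 y List.mem_cons_self
    have hyq' : ∀ z ∈ q', y < z := (List.pairwise_cons.mp hp').1
    have hzip : ((x :: y :: q').zip (y :: q')) = (x, y) :: ((y :: q').zip q') := rfl
    rw [hzip, List.foldl_cons]
    have hinv' : ∀ c ∈ cuts, c ≤ y ∨ c ∈ q' := by
      intro c hc
      rcases hinv c hc with h1 | h2
      · exact Or.inl (by omega)
      · rcases List.mem_cons.mp h2 with h3 | h4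
        · exact Or.inl (by omega)
        · exact Or.inr h4
    rw [ih y _ hp' hinv']
    rw [List.getLastD_cons]
    have hconst : ∀ i, x ≤ i → i < y → F i = F x := by
      intro i hxi hiy
      apply hF x i hxi
      intro c hc ⟨hc1, hc2⟩
      rcases hinv c hc with h1 | h2
      · omega
      · rcases List.mem_cons.mp h2 with h3 | h4
        · omega
        · have := hyq' c h4; omega
    have hrep : List.replicate (y - x).toNat (F x) = (PySem.List.pyRange x y 1).map F :=
      (map_range_const F x y hconst).symm
    have hL : y ≤ q'.getLastD y := (pairwise_lastD q' y hp').2 y List.mem_cons_self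
    rw [hrep, PySem.List.pyRange_one_append x y (q'.getLastD y) (by omega) hL, List.map_append,
        List.append_assoc]

-- the cut-point list determines the whole segment fold: with every clamped endpoint among the
-- cut points, the fold over consecutive sorted cut points rebuilds the frame-major normal form
theorem seg_main (nf : Int) (pre : String) (ibt : List (String × List (Int × Int)))
    (cutsL : List Int)
    (hnodup : cutsL.Nodup) (hbounds : ∀ x ∈ cutsL, 0 ≤ x ∧ x ≤ nf)
    (h0mem : (0 : Int) ∈ cutsL) (hnfmem : nf ∈ cutsL)
    (hcut : ∀ tv ∈ ibt, PySem.Str.startswith tv.1 pre = true → ∀ se ∈ tv.2,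
      (pvClamp nf se).1 ∈ cutsL ∧ (pvClamp nf se).2 + 1 ∈ cutsL) :
    ((PySem.List.sorted cutsL (fun x => x) false).zip (PySem.List.sorted cutsL (fun x => x) false).tail).foldl
      (fun pf ab => pf ++ List.replicate (ab.2 - ab.1).toNat
        (((ibt.filter (fun tv => PySem.Str.startswith tv.1 pre)).map
            (fun tv => (leafPy tv.1, tv.2.map (pvClamp nf)))).foldl
          (fun seg it => if it.2.any (fun lh => decide (lh.1 ≤ ab.1) && decide (ab.1 ≤ lh.2))
                         then PySem.Set.add seg it.1 else seg)
          PySem.Set.empty)) []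
    = pvFrames nf pre ibt := by
  have hperm : (PySem.List.sorted cutsL (fun x => x) false).Perm cutsL :=
    PySem.List.sorted_perm cutsL (fun x => x) false
  have hmemiff : ∀ c, c ∈ PySem.List.sorted cutsL (fun x => x) false ↔ c ∈ cutsL :=
    fun c => hperm.mem_iff
  have hptsnodup : (PySem.List.sorted cutsL (fun x => x) false).Nodup := hperm.symm.nodup_iff.mp hnodup
  have hptsle : (PySem.List.sorted cutsL (fun x => x) false).Pairwise (fun a b => a ≤ b) := by
    have := PySem.List.sorted_pairwise cutsL (fun x => x)
    simpa using this
  have hptslt : (PySem.List.sorted cutsL (fun x => x) false).Pairwise (· < ·) := by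
    have hand := hptsle.and hptsnodup
    exact hand.imp (fun hab => lt_of_le_of_ne hab.1 hab.2)
  obtain ⟨p, q, hpq⟩ : ∃ p q, PySem.List.sorted cutsL (fun x => x) false = p :: q := by
    cases hcase : PySem.List.sorted cutsL (fun x => x) false with
    | nil => rw [hcase] at hmemiff; exact absurd ((hmemiff 0).mpr h0mem) (by simp)
    | cons p q => exact ⟨p, q, rfl⟩
  rw [hpq] at hmemiff hptslt
  have hqlt : ∀ z ∈ q, p < z := (List.pairwise_cons.mp hptslt).1
  have hp0 : p = 0 := by
    have hpmem : p ∈ cutsL := (hmemiff p).mp List.mem_cons_self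
    have hpge : 0 ≤ p := (hbounds p hpmem).1
    rcases List.mem_cons.mp ((hmemiff 0).mpr h0mem) with h1 | h1
    · omega
    · have := hqlt 0 h1; omega
  have hlast : q.getLastD p = nf := by
    obtain ⟨hm, hb⟩ := pairwise_lastD q p hptslt
    have hLmem : q.getLastD p ∈ cutsL := (hmemiff _).mp hm
    have h1 := hb nf ((hmemiff nf).mpr hnfmem)
    have h2 := (hbounds _ hLmem).2
    omega
  have hF : ∀ a i, a ≤ i → (∀ c ∈ cutsL, ¬ (a < c ∧ c ≤ i)) →
      ibt.foldl (pvBStep nf pre i) PySem.Set.empty = ibt.foldl (pvBStep nf pre a) PySem.Set.empty :=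
    fun a i hai hno => frame_const nf pre ibt cutsL hcut a i hai hno
  rw [hpq, List.tail_cons]
  have hcongr : ((p :: q).zip q).foldl
      (fun pf ab => pf ++ List.replicate (ab.2 - ab.1).toNat
        (((ibt.filter (fun tv => PySem.Str.startswith tv.1 pre)).map
            (fun tv => (leafPy tv.1, tv.2.map (pvClamp nf)))).foldl
          (fun seg it => if it.2.any (fun lh => decide (lh.1 ≤ ab.1) && decide (ab.1 ≤ lh.2))
                         then PySem.Set.add seg it.1 else seg)
          PySem.Set.empty)) []
      = ((p :: q).zip q).foldl
      (fun pf ab => pf ++ List.replicate (ab.2 - ab.1).toNat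
        (ibt.foldl (pvBStep nf pre ab.1) PySem.Set.empty)) [] := by
    apply PySem.List.foldl_congr_mem
    intro acc ab _
    rw [segset_eq nf pre ab.1 ibt]
  rw [hcongr, seg_fold hF q p [] hptslt
      (fun c hc => by
        rcases List.mem_cons.mp ((hmemiff c).mpr hc) with h1 | h1
        · exact Or.inl (le_of_eq h1)
        · exact Or.inr h1)]
  rw [hlast, hp0, List.nil_append]
  rfl

-- B equals the frame-major normal form
theorem B_eq_frames (ibt : List (String × List (Int × Int))) (nf : Int) (pre : String) :
    build_per_frame_sets_py_alt ibt nf pre = pvFrames nf pre ibt := by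
  by_cases hnf : nf ≤ 0
  · unfold build_per_frame_sets_py_alt pvFrames
    rw [if_pos hnf, PySem.List.pyRange_one_eq_nil hnf, List.map_nil]
  · have h : 0 < nf := by omega
    have halt : build_per_frame_sets_py_alt ibt nf pre
        = (((PySem.List.sorted
              (ibt.foldl (pvOuterStep nf pre)
                (([] : List (String × List (Int × Int))), PySem.Set.add (PySem.Set.add PySem.Set.empty 0) nf)).2
              (fun x => x) false).zip
            (PySem.List.sorted
              (ibt.foldl (pvOuterStep nf pre)
                (([] : List (String × List (Int × Int))), PySem.Set.add (PySem.Set.add PySem.Set.empty 0) nf)).2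
              (fun x => x) false).tail).foldl
            (fun pf ab => pf ++ List.replicate (ab.2 - ab.1).toNat
              ((ibt.foldl (pvOuterStep nf pre)
                  (([] : List (String × List (Int × Int))), PySem.Set.add (PySem.Set.add PySem.Set.empty 0) nf)).1.foldl
                (fun seg it => if it.2.any (fun lh => decide (lh.1 ≤ ab.1) && decide (ab.1 ≤ lh.2))
                               then PySem.Set.add seg it.1 else seg)
                PySem.Set.empty)) []) := by
      unfold build_per_frame_sets_py_alt
      rw [if_neg hnf]
      rfl
    rw [halt,
        outer_items nf pre ibt [] (PySem.Set.add (PySem.Set.add PySem.Set.empty 0) nf),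
        outer_cuts nf pre ibt [] (PySem.Set.add (PySem.Set.add PySem.Set.empty 0) nf),
        List.nil_append]
    apply seg_main nf pre ibt _
    · exact cuts_nodup nf _ _ (PySem.Set.nodup_add _ _ (PySem.Set.nodup_add _ _ List.nodup_nil))
    · apply cuts_bounds nf h
      intro x hx
      rcases mem_add_elim hx with h1 | h1
      · rcases mem_add_elim h1 with h2 | h2
        · cases h2
        · omega
      · omega
    · exact mem_cuts_foldl nf _ _ 0
        ((PySem.Set.mem_add _ _ _).mpr (Or.inl ((PySem.Set.mem_add _ _ _).mpr (Or.inr rfl))))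
    · exact mem_cuts_foldl nf _ _ nf ((PySem.Set.mem_add _ _ _).mpr (Or.inr rfl))
    · intro tv htv hs se hse
      exact endpoints_mem nf _ _ tv se (List.mem_filter.mpr ⟨htv, by simpa using hs⟩) hse

-- ===== VERDICT (by name: the statement is the Claim_ definition above) =====
theorem build_per_frame_sets_py_spec : Claim_equal_build_per_frame_sets_py := by
  intro ibt nf pre _
  unfold Spec_build_per_frame_sets_py
  rw [A_eq_frames, B_eq_frames]
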